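-- pv_equiv track=rewrite | github.com/Maerig/advent_of_code_2017 | day21/main.py | split_grid
-- ===== SOURCE A (Python) =====
-- def split_grid(grid):
--     grid_size = len(grid)
--     square_size = 2 if (grid_size % 2 == 0) else 3
--
--     return [  # Square rows
--         [  # Squares
--             [
--                 sub_row[square_idx * square_size: square_idx * square_size + square_size]
--                 for sub_row in grid[square_row_idx * square_size: square_row_idx * square_size + square_size]
--             ]
--             for square_idx in range(grid_size // square_size)
--         ]
--         for square_row_idx in range(grid_size // square_size)
--     ]
-- ===== SOURCE B (Python) =====
-- def split_grid(grid):
--     n = len(grid)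
--     s = 2 if n % 2 == 0 else 3
--     k = n // s
--     rows = grid[:k * s]  # drop the remainder rows exactly as A's range() does
--     out = []
--     while rows:
--         group, rows = rows[:s], rows[s:]
--         pieces = [[r[j * s:j * s + s] for j in range(k)] for r in group]
--         out.append([list(col) for col in zip(*pieces)])
--     return out
-- ===== Notes on version B (the rewrite author's own statement) =====
-- stated objective: alternative
-- what changed: Instead of indexing the grid per block with two nested range() comprehensions and re-slicing row ranges, B consumes the row list once in chunks of square_size, chops each row of a chunk into its k segments, and forms the blocks of that chunk by a zip(*) transpose.
import Mathlib
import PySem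

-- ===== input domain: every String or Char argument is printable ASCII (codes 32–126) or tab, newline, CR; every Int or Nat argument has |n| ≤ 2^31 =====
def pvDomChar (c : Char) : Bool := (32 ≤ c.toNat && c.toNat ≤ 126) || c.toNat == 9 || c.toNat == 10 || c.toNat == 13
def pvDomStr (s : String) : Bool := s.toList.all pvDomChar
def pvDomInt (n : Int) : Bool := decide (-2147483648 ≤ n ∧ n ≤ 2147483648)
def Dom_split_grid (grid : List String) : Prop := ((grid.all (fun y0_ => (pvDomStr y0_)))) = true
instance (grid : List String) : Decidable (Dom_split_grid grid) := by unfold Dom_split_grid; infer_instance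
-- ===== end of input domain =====

-- B replaces A's per-block nested-range indexing by one chunking pass over the rows plus a zip(*) transpose per chunk (objective: alternative decomposition, same cost).

-- ===== PORT A =====
def split_grid (grid : List String) : List (List (List String)) :=
  let gridSize : Int := grid.length
  let squareSize : Int := if PySem.Int.mod gridSize 2 = 0 then 2 else 3
  (PySem.List.pyRange 0 (PySem.Int.floordiv gridSize squareSize) 1).map fun squareRowIdx =>
    (PySem.List.pyRange 0 (PySem.Int.floordiv gridSize squareSize) 1).map fun squareIdx =>
      (PySem.List.slice grid (some (squareRowIdx * squareSize))
          (some (squareRowIdx * squareSize + squareSize))).map fun subRow =>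
        PySem.Str.slice subRow (some (squareIdx * squareSize))
          (some (squareIdx * squareSize + squareSize))

-- ===== PORT B =====
-- [r[j*s : j*s+s] for j in range(k)]  (s, k are the nonnegative square_size and block count)
def pvChop (s k : Nat) (row : String) : List String :=
  (List.range k).map fun j =>
    PySem.Str.slice row (some ((j * s : Nat) : Int)) (some ((j * s + s : Nat) : Int))

-- [list(col) for col in zip(*ls)] : Python's zip over the unpacked lists (stops at the
-- shortest iterable; zero iterables yield nothing); structural recursion on the first list
def pvZipGo : List String → List (List String) → List (List String)
  | [], _ => []
  | x :: xs, rest =>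
      if rest.any List.isEmpty then []
      else (x :: rest.map List.headI) :: pvZipGo xs (rest.map List.tail)

def pvZipT : List (List String) → List (List String)
  | [] => []
  | first :: rest => pvZipGo first rest

-- the while loop: group, rows = rows[:s], rows[s:]; for s ≥ 1 and rows = r :: rest these are
-- r :: rest.take (s-1) and rest.drop (s-1)
def pvSplitRows (s k : Nat) (rows : List String) : List (List (List String)) :=
  match rows with
  | [] => []
  | r :: rest =>
      pvZipT ((r :: rest.take (s - 1)).map (pvChop s k)) ::
        pvSplitRows s k (rest.drop (s - 1))
termination_by rows.length
decreasing_by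
  simp only [List.length_drop, List.length_cons]
  omega

def split_grid_alt (grid : List String) : List (List (List String)) :=
  let n : Nat := grid.length
  let s : Nat := if n % 2 = 0 then 2 else 3
  let k : Nat := n / s
  pvSplitRows s k (grid.take (k * s))

-- ===== PRECONDITION & SPEC =====
def Spec_split_grid (grid : List String) (out : List (List (List String))) : Prop := out = split_grid_alt grid
instance (grid : List String) (out : List (List (List String))) : Decidable (Spec_split_grid grid out) := by unfold Spec_split_grid; infer_instance

-- ===== CLAIM (what is proved, stated in full; the proofs are below) =====
def Claim_equal_split_grid : Prop := ∀ (grid : List String), Dom_split_grid grid → Spec_split_grid grid (split_grid grid)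

-- ===== LEMMAS AND PROOFS =====

-- zip(*) of k-wide rows built by a common column function f is the column-indexed map
lemma pvZipGo_map_range (k : Nat) :
    ∀ (f : Nat → String → String) (r0 : String) (gr : List String),
    pvZipGo ((List.range k).map fun j => f j r0) (gr.map fun r => (List.range k).map fun j => f j r)
      = (List.range k).map fun j => (r0 :: gr).map (f j) := by
  induction k with
  | zero => intro f r0 gr; simp [pvZipGo]
  | succ k ih =>
      intro f r0 gr
      rw [List.range_succ_eq_map]
      simp only [List.map_cons, List.map_map, Function.comp_def]
      rw [pvZipGo]
      rw [if_neg (by simp [List.any_map, Function.comp_def])]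
      have hheads : (gr.map fun r => f 0 r :: (List.range k).map fun j => f (j + 1) r).map List.headI
          = gr.map (f 0) := by simp [List.map_map]
      have htails : (gr.map fun r => f 0 r :: (List.range k).map fun j => f (j + 1) r).map List.tail
          = gr.map fun r => (List.range k).map fun j => (fun j r => f (j + 1) r) j r := by
        simp [List.map_map]
      rw [hheads, htails, ih (fun j r => f (j + 1) r) r0 gr]
      simp [Nat.succ_eq_add_one]

lemma pvZipT_map_range (k : Nat) (f : Nat → String → String) (g : List String) (hg : g ≠ []) :
    pvZipT (g.map fun r => (List.range k).map fun j => f j r)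
      = (List.range k).map fun j => g.map (f j) := by
  cases g with
  | nil => exact absurd rfl hg
  | cons r0 gr =>
      simp only [List.map_cons, pvZipT]
      exact pvZipGo_map_range k f r0 gr

-- unrolling the chunking loop over exactly m chunks of a length-(m*s) prefix (k columns carried along)
lemma pvSplitRows_take (s' k : Nat) :
    ∀ (m : Nat) (l : List String), m * (s' + 1) ≤ l.length →
      pvSplitRows (s' + 1) k (l.take (m * (s' + 1)))
        = (List.range m).map fun bi =>
            pvZipT (((l.drop (bi * (s' + 1))).take (s' + 1)).map (pvChop (s' + 1) k)) := by
  intro m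
  induction m with
  | zero => intro l _; simp [pvSplitRows]
  | succ m ih =>
      intro l hl
      cases l with
      | nil => simp at hl
      | cons a t =>
        have hTke : (a :: t).take ((m + 1) * (s' + 1)) = a :: t.take ((m + 1) * (s' + 1) - 1) := by
          have h0 : (m + 1) * (s' + 1) = ((m + 1) * (s' + 1) - 1) + 1 := by
            have : 1 ≤ (m + 1) * (s' + 1) := Nat.one_le_iff_ne_zero.mpr (by positivity)
            omega
          conv_lhs => rw [h0]
          rw [List.take_succ_cons]
        rw [hTke, pvSplitRows]
        simp only [Nat.add_sub_cancel]
        have hgroup : (t.take ((m + 1) * (s' + 1) - 1)).take s' = t.take s' := by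
          rw [List.take_take]
          congr 1
          have h1 : s' + 1 ≤ (m + 1) * (s' + 1) := Nat.le_mul_of_pos_left _ (by omega)
          omega
        have hrest : (t.take ((m + 1) * (s' + 1) - 1)).drop s' = (t.drop s').take (m * (s' + 1)) := by
          rw [List.drop_take]
          congr 1
          have : (m + 1) * (s' + 1) = m * (s' + 1) + s' + 1 := by ring
          omega
        have hlen : m * (s' + 1) ≤ (t.drop s').length := by
          simp only [List.length_drop]
          simp only [List.length_cons] at hl
          have : (m + 1) * (s' + 1) = m * (s' + 1) + s' + 1 := by ring
          omega
        rw [hgroup, hrest, ih (t.drop s') hlen]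
        rw [List.range_succ_eq_map]
        simp only [List.map_cons, List.map_map, Function.comp_def]
        congr 1
        · congr 2
          simp
        · apply List.map_congr_left
          intro bi _
          congr 2
          rw [show bi.succ * (s' + 1) = (s' + bi * (s' + 1)) + 1 from by simp [Nat.succ_eq_add_one]; ring,
            List.drop_succ_cons, List.drop_drop, Nat.add_comm]

-- pyRange 0 k 1 over a Nat cast is the mapped Nat range
lemma pyRange_zero_natCast' (k : Nat) :
    PySem.List.pyRange 0 ((k : Nat) : Int) 1 = (List.range k).map (fun j : Nat => (j : Int)) := by
  rw [PySem.List.pyRange_one]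
  simp only [Int.sub_zero, Int.toNat_natCast, Int.zero_add]

-- A, rewritten with Nat parameters s (= square_size) and k (= block count)
lemma split_grid_as_range (grid : List String) (s : Nat)
    (hss : (if PySem.Int.mod (grid.length : Int) 2 = 0 then (2 : Int) else 3) = (s : Int)) :
    split_grid grid
      = (List.range (grid.length / s)).map fun bi =>
          (List.range (grid.length / s)).map fun j =>
            ((grid.drop (bi * s)).take s).map fun r =>
              PySem.Str.slice r (some ((j * s : Nat) : Int)) (some ((j * s + s : Nat) : Int)) := by
  unfold split_grid
  simp only [hss]
  have hfd : PySem.Int.floordiv ((grid.length : Nat) : Int) ((s : Nat) : Int)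
      = ((grid.length / s : Nat) : Int) := PySem.Int.floordiv_natCast _ _
  rw [hfd, pyRange_zero_natCast']
  simp only [List.map_map, Function.comp_def]
  apply List.map_congr_left
  intro bi _
  apply List.map_congr_left
  intro j _
  have hsl : PySem.List.slice grid (some ((bi : Int) * (s : Int)))
      (some ((bi : Int) * (s : Int) + (s : Int))) = (grid.drop (bi * s)).take s := by
    have h1 : ((bi : Int) * (s : Int)) = ((bi * s : Nat) : Int) := by push_cast; ring
    rw [h1, PySem.List.slice_natCast_add]
  rw [hsl]
  apply List.map_congr_left
  intro r _
  congr 2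

-- ===== VERDICT (by name: the statement is the Claim_ definition above) =====
theorem split_grid_spec : Claim_equal_split_grid := by
  intro grid _
  unfold Spec_split_grid split_grid_alt
  by_cases hpar : grid.length % 2 = 0
  · -- even: s = 2
    have hss : (if PySem.Int.mod (grid.length : Int) 2 = 0 then (2 : Int) else 3) = ((2 : Nat) : Int) := by
      rw [if_pos]
      · norm_num
      · rw [show ((2:Int)) = ((2:Nat):Int) by norm_num, PySem.Int.mod_natCast]
        exact_mod_cast hpar
    rw [split_grid_as_range grid 2 hss]
    simp only [if_pos hpar]
    rw [show (2:Nat) = 1 + 1 by rfl] at *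
    rw [pvSplitRows_take 1 (grid.length / (1+1)) (grid.length / (1+1)) grid (Nat.div_mul_le_self _ _)]
    apply List.map_congr_left
    intro bi hbi
    have hg : (grid.drop (bi * (1+1))).take (1+1) ≠ [] := by
      simp only [List.mem_range] at hbi
      have h1 : bi * (1+1) < grid.length := by
        have := Nat.lt_of_lt_of_le hbi (Nat.le_refl _)
        have h2 : (bi + 1) * (1+1) ≤ grid.length := by
          calc (bi + 1) * (1+1) ≤ (grid.length / (1+1)) * (1+1) := by
                exact Nat.mul_le_mul_right _ hbi
            _ ≤ grid.length := Nat.div_mul_le_self _ _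
        nlinarith
      simp only [ne_eq, List.take_eq_nil_iff, List.drop_eq_nil_iff]
      push Not
      constructor <;> omega
    rw [show pvChop (1+1) (grid.length / (1+1)) = fun r => (List.range (grid.length / (1+1))).map
          fun j => PySem.Str.slice r (some ((j * (1+1) : Nat) : Int)) (some ((j * (1+1) + (1+1) : Nat) : Int)) from rfl]
    rw [pvZipT_map_range _ _ _ hg]
  · -- odd: s = 3
    have hss : (if PySem.Int.mod (grid.length : Int) 2 = 0 then (2 : Int) else 3) = ((3 : Nat) : Int) := by
      rw [if_neg]
      · norm_num
      · rw [show ((2:Int)) = ((2:Nat):Int) by norm_num, PySem.Int.mod_natCast]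
        intro h
        exact hpar (by exact_mod_cast h)
    rw [split_grid_as_range grid 3 hss]
    simp only [if_neg hpar]
    rw [show (3:Nat) = 2 + 1 by rfl] at *
    rw [pvSplitRows_take 2 (grid.length / (2+1)) (grid.length / (2+1)) grid (Nat.div_mul_le_self _ _)]
    apply List.map_congr_left
    intro bi hbi
    have hg : (grid.drop (bi * (2+1))).take (2+1) ≠ [] := by
      simp only [List.mem_range] at hbi
      have h1 : bi * (2+1) < grid.length := by
        have h2 : (bi + 1) * (2+1) ≤ grid.length := by
          calc (bi + 1) * (2+1) ≤ (grid.length / (2+1)) * (2+1) := by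
                exact Nat.mul_le_mul_right _ hbi
            _ ≤ grid.length := Nat.div_mul_le_self _ _
        nlinarith
      simp only [ne_eq, List.take_eq_nil_iff, List.drop_eq_nil_iff]
      push Not
      constructor <;> omega
    rw [show pvChop (2+1) (grid.length / (2+1)) = fun r => (List.range (grid.length / (2+1))).map
          fun j => PySem.Str.slice r (some ((j * (2+1) : Nat) : Int)) (some ((j * (2+1) + (2+1) : Nat) : Int)) from rfl]
    rw [pvZipT_map_range _ _ _ hg]
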